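-- pv_equiv track=rewrite | github.com/silentdill1/pythonkurs | median_string.py | det_median_string
-- ===== SOURCE A (Python) =====
-- def hd(k_mer, text):
--     k = len(k_mer)
--     h_dis = k
--     for i in range(len(text)-k+1):
--         n_hd = k
--         for j, letter in enumerate(text[i:i+k]):
--             if letter == k_mer[j]:
--                 n_hd -= 1
--         if n_hd < h_dis:
--             h_dis = n_hd
--     return h_dis
--
-- def det_median_string(dna, k):
--     median_string = ''
--     min_hd_sum = k*len(dna)
--     for line_index, line in enumerate(dna):
--         for i in range(len(line)-k+1):
--             pattern = line[i:i+k]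
--             hd_sum = sum([hd(pattern, cl) for i, cl in enumerate(dna) if i != line_index])
--             # unnecessary expensive list creation
--             if hd_sum < min_hd_sum:
--                 min_hd_sum = hd_sum
--                 median_string = pattern
--     return median_string
-- ===== SOURCE B (Python) =====
-- def hd(k_mer, text):
--     k = len(k_mer)
--     return min((sum(1 for c, d in zip(k_mer, text[i:i+k]) if c != d)
--                 for i in range(len(text)-k+1)), default=k)
--
-- def det_median_string(dna, k):
--     # collect the distinct candidate k-mers once (first-occurrence order)
--     windows = [line[i:i+k] for line in dna for i in range(len(line)-k+1)]
--     patterns = list(dict.fromkeys(windows))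
--     # one Hamming-distance row per distinct pattern, computed once
--     table = {p: [hd(p, line) for line in dna] for p in patterns}
--     median_string = ''
--     min_hd_sum = k*len(dna)
--     for line_index, line in enumerate(dna):
--         for i in range(len(line)-k+1):
--             pattern = line[i:i+k]
--             row = table[pattern]
--             hd_sum = sum(row) - row[line_index]
--             if hd_sum < min_hd_sum:
--                 min_hd_sum = hd_sum
--                 median_string = pattern
--     return median_string
-- ===== Notes on version B (the rewrite author's own statement) =====
-- stated objective: alternative
-- what changed: B collects the distinct k-mers once, precomputes a dict mapping each distinct k-mer to its list of Hamming distances to every line, and scores each candidate as row-total minus its own line's entry, instead of A's recomputation of hd against all other lines for every window occurrence; B's hd takes the min of per-window mismatch counts instead of A's decrementing double loop.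
import Mathlib
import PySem

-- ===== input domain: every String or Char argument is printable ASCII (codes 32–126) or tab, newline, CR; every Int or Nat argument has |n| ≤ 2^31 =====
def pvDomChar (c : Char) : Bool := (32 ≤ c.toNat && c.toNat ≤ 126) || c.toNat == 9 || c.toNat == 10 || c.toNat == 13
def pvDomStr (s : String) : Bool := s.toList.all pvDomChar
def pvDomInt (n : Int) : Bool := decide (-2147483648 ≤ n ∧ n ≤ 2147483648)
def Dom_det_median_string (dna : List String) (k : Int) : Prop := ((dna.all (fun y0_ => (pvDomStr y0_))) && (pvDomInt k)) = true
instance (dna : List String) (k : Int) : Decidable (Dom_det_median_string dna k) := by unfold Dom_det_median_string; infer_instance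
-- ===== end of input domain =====

-- B memoizes one Hamming-distance row per DISTINCT k-mer (dict built once) and gets each
-- candidate's score as row-total-minus-own-entry, instead of A's per-candidate rescan of all
-- other lines; objective: alternative (a genuinely different algorithm of similar cost).

-- ===== PORT A =====
-- helper hd(k_mer, text)
def hdA (km txt : List Char) : Int :=
  let k : Int := km.length
  (PySem.List.pyRange 0 ((txt.length : Int) - k + 1) 1).foldl (fun h_dis i =>
    let n_hd := (PySem.List.enumerate (PySem.List.slice txt (some i) (some (i + k))) 0).foldl
      (fun n jl => if PySem.List.pyGet? km jl.1 = some jl.2 then n - 1 else n) k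
    if n_hd < h_dis then n_hd else h_dis) k

def det_median_string (dna : List String) (k : Int) : String :=
  let res := (PySem.List.enumerate dna 0).foldl (fun acc le =>
    (PySem.List.pyRange 0 ((le.2.toList.length : Int) - k + 1) 1).foldl (fun acc2 i =>
      let pattern := PySem.List.slice le.2.toList (some i) (some (i + k))
      let hd_sum := (((PySem.List.enumerate dna 0).filter (fun p => p.1 != le.1)).map
          (fun p => hdA pattern p.2.toList)).sum
      if hd_sum < acc2.2 then (pattern, hd_sum) else acc2) acc)
    (([], k * (dna.length : Int)) : List Char × Int)
  String.ofList res.1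

-- ===== PORT B =====
-- helper hd(k_mer, text) of Source B: min of per-window mismatch counts, default k
def hdB (p txt : List Char) : Int :=
  let k : Int := p.length
  let vals := (PySem.List.pyRange 0 ((txt.length : Int) - k + 1) 1).map (fun i =>
      (((p.zip (PySem.List.slice txt (some i) (some (i + k)))).countP (fun cd => cd.1 != cd.2) : Nat) : Int))
  (PySem.List.min? vals (fun x => x)).getD k

def det_median_string_alt (dna : List String) (k : Int) : String :=
  let windows := dna.flatMap (fun line =>
    (PySem.List.pyRange 0 ((line.toList.length : Int) - k + 1) 1).map
      (fun i => PySem.List.slice line.toList (some i) (some (i + k))))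
  let patterns := PySem.List.dedup windows
  let table : PySem.Dict (List Char) (List Int) :=
    patterns.foldl (fun d p => d.insert p (dna.map (fun l => hdB p l.toList))) PySem.Dict.empty
  let res := (PySem.List.enumerate dna 0).foldl (fun acc le =>
    (PySem.List.pyRange 0 ((le.2.toList.length : Int) - k + 1) 1).foldl (fun acc2 i =>
      let pattern := PySem.List.slice le.2.toList (some i) (some (i + k))
      let row := (table.get? pattern).getD []
      let hd_sum := row.sum - PySem.List.pyGetD row le.1 0
      if hd_sum < acc2.2 then (pattern, hd_sum) else acc2) acc)
    (([], k * (dna.length : Int)) : List Char × Int)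
  String.ofList res.1

-- ===== PRECONDITION & SPEC =====
def Spec_det_median_string (dna : List String) (k : Int) (out : String) : Prop := out = det_median_string_alt dna k
instance (dna : List String) (k : Int) (out : String) : Decidable (Spec_det_median_string dna k out) := by unfold Spec_det_median_string; infer_instance

-- ===== CLAIM (what is proved, stated in full; the proofs are below) =====
def Claim_equal_det_median_string : Prop := ∀ (dna : List String) (k : Int), Dom_det_median_string dna k → Spec_det_median_string dna k (det_median_string dna k)

-- ===== LEMMAS AND PROOFS =====

-- A's inner mismatch loop counts matches down from its initial value
theorem inner_count (seg : List Char) : ∀ (pre km : List Char) (n : Int), seg.length ≤ km.length →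
    (PySem.List.enumerate seg (pre.length : Int)).foldl
      (fun n jl => if PySem.List.pyGet? (pre ++ km) jl.1 = some jl.2 then n - 1 else n) n
    = n - ((km.zip seg).countP (fun cd => cd.1 == cd.2) : Int) := by
  induction seg with
  | nil => intro pre km n _; simp [PySem.List.enumerate_nil]
  | cons c seg' ih =>
    intro pre km n h
    match km with
    | [] => simp at h
    | m :: km' =>
      rw [PySem.List.enumerate_cons]
      simp only [List.foldl_cons]
      have h2 : seg'.length ≤ km'.length := by simpa using h
      have hih := ih (pre ++ [m]) km'
        (if PySem.List.pyGet? (pre ++ m :: km') (pre.length : Int) = some c then n - 1 else n) h2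
      have hlen : (((pre ++ [m]).length : Nat) : Int) = (pre.length : Int) + 1 := by simp
      have happ : pre ++ [m] ++ km' = pre ++ m :: km' := by simp
      rw [hlen, happ] at hih
      rw [hih, PySem.List.pyGet?_append_length]
      by_cases hmc : m = c
      · simp [hmc, List.countP_cons]; omega
      · have : ¬ ((some m : Option Char) = some c) := by simp [hmc]
        rw [if_neg this]
        have hb : ((m, c).1 == (m, c).2) = false := by simpa using hmc
        simp [List.countP_cons, hb]

theorem inner_count0 (seg km : List Char) (n : Int) (h : seg.length ≤ km.length) :
    (PySem.List.enumerate seg 0).foldl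
      (fun n jl => if PySem.List.pyGet? km jl.1 = some jl.2 then n - 1 else n) n
    = n - ((km.zip seg).countP (fun cd => cd.1 == cd.2) : Int) := by
  have h0 := inner_count seg [] km n h
  simpa using h0

-- mismatches are the pairs that are not matches
theorem countNe_eq : ∀ (z : List (Char × Char)),
    ((z.countP (fun cd => cd.1 != cd.2)) : Int) = (z.length : Int) - (z.countP (fun cd => cd.1 == cd.2) : Int) := by
  intro z
  induction z with
  | nil => simp
  | cons a t ih =>
    rw [List.countP_cons, List.countP_cons]
    by_cases h : a.1 = a.2
    · have h1 : (a.1 != a.2) = false := by simp [h]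
      have h2 : (a.1 == a.2) = true := by simp [h]
      rw [h1, h2]
      simp only [Bool.false_eq_true, if_false, if_true, List.length_cons]
      push_cast
      omega
    · have h1 : (a.1 != a.2) = true := by simp [h]
      have h2 : (a.1 == a.2) = false := by simp [h]
      rw [h1, h2]
      simp only [Bool.false_eq_true, if_false, if_true, List.length_cons]
      push_cast
      omega

-- A's running strict-< minimum loop is foldl min
theorem foldl_minstep (l : List Int) : ∀ (a : Int),
    l.foldl (fun h v => if v < h then v else h) a = l.foldl min a := by
  induction l with
  | nil => intro a; rfl
  | cons v t ih =>
    intro a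
    simp only [List.foldl_cons]
    have : (if v < a then v else a) = min a v := by split_ifs <;> omega
    rw [this, ih]

-- the strict-< selection fold over values f i equals min-with-default of the g i, when f = g on l and g ≤ k
theorem fold_to_min (f g : Int → Int) (l : List Int) (k : Int)
    (hfg : ∀ i ∈ l, f i = g i) (hb : ∀ i ∈ l, g i ≤ k) :
    l.foldl (fun h i => if f i < h then f i else h) k
      = (PySem.List.min? (l.map g) (fun x => x)).getD k := by
  have h1 : l.foldl (fun h i => if f i < h then f i else h) k
      = l.foldl (fun h i => if g i < h then g i else h) k := by
    apply PySem.List.foldl_congr_mem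
    intro acc i hi
    rw [hfg i hi]
  rw [h1, ← List.foldl_map (f := g) (g := fun h v => if v < h then v else h), foldl_minstep]
  have hb' : ∀ v ∈ l.map g, v ≤ k := by
    intro v hv
    obtain ⟨i, hi, rfl⟩ := List.mem_map.mp hv
    exact hb i hi
  rcases hV : l.map g with _ | ⟨v0, t⟩
  · rfl
  · rw [hV] at hb'
    rw [PySem.List.min?_id_cons, Option.getD_some, List.foldl_cons]
    have hv0 : v0 ≤ k := hb' v0 (List.mem_cons_self)
    have : min k v0 = v0 := by omega
    rw [this]

-- hd of Source A equals hd of Source B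
theorem hd_eq (km txt : List Char) : hdA km txt = hdB km txt := by
  simp only [hdA, hdB]
  apply fold_to_min
  · intro i hi
    rw [PySem.List.mem_pyRange_one] at hi
    have h0i : 0 ≤ i := hi.1
    have hik : i + (km.length : Int) ≤ (txt.length : Int) := by omega
    have hs := PySem.List.slice_toNat (xs := txt) (a := i) (b := i + (km.length : Int)) h0i (by omega)
    have hslen : (PySem.List.slice txt (some i) (some (i + (km.length : Int)))).length = km.length := by
      rw [hs]; simp; omega
    rw [inner_count0 (PySem.List.slice txt (some i) (some (i + (km.length : Int)))) km
      ((km.length : Nat) : Int) (le_of_eq hslen)]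
    have hziplen : (km.zip (PySem.List.slice txt (some i) (some (i + (km.length : Int))))).length
        = km.length := by
      rw [List.length_zip, hslen]; omega
    rw [countNe_eq]
    omega
  · intro i _
    have h1 := List.countP_le_length
      (p := fun cd : Char × Char => cd.1 != cd.2)
      (l := km.zip (PySem.List.slice txt (some i) (some (i + (km.length : Int)))))
    have h2 : (km.zip (PySem.List.slice txt (some i) (some (i + (km.length : Int))))).length
        ≤ km.length := by
      rw [List.length_zip]; omega
    omega

-- lookup in the dict built by the comprehension {p: f p for p in ps}
theorem lookup_foldl_insert (f : List Char → List Int) :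
    ∀ (ps : List (List Char)) (d : PySem.Dict (List Char) (List Int)) (p : List Char),
    (ps.foldl (fun d p => d.insert p (f p)) d).get? p
      = if p ∈ ps then some (f p) else d.get? p := by
  intro ps
  induction ps with
  | nil => intro d p; simp
  | cons q t ih =>
    intro d p
    simp only [List.foldl_cons]
    rw [ih, PySem.Dict.get?_insert]
    by_cases hpt : p ∈ t
    · simp [hpt, List.mem_cons]
    · by_cases hpq : p = q
      · simp [hpt, hpq]
      · simp [hpt, hpq, List.mem_cons]

-- indices smaller than every index produced by enumerate pass the ≠ filter
theorem filter_ne_small {α : Type} : ∀ (t : List α) (s r : Int), r < s →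
    (PySem.List.enumerate t s).filter (fun p => p.1 != r) = PySem.List.enumerate t s := by
  intro t
  induction t with
  | nil => intro s r _; simp [PySem.List.enumerate_nil]
  | cons x t ih =>
    intro s r hr
    rw [PySem.List.enumerate_cons]
    have hcond : ((s, x).1 != r) = true := by simp; omega
    rw [List.filter_cons, if_pos hcond, ih (s + 1) r (by omega)]

-- the sum over enumerate dropping snd's entry
theorem map_snd_sum {α : Type} (g : α → Int) (xs : List α) (s : Int) :
    ((PySem.List.enumerate xs s).map (fun p => g p.2)).sum = (xs.map g).sum := by
  have : (fun p : Int × α => g p.2) = g ∘ (fun p : Int × α => p.2) := rfl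
  rw [this, ← List.map_map, PySem.List.map_snd_enumerate]

-- the filtered sum of A equals total minus the own-line entry
theorem filt_sum {α : Type} (g : α → Int) : ∀ (xs : List α) (s : Int) (j : Nat) (hj : j < xs.length),
    (((PySem.List.enumerate xs s).filter (fun p => p.1 != s + (j : Int))).map (fun p => g p.2)).sum
    = (xs.map g).sum - g (xs[j]'hj) := by
  intro xs
  induction xs with
  | nil => intro s j hj; simp at hj
  | cons x t ih =>
    intro s j hj
    rw [PySem.List.enumerate_cons]
    match j with
    | 0 =>
      have hcond : ((s, x).1 != s + ((0 : Nat) : Int)) = false := by simp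
      rw [List.filter_cons, if_neg (by simp [hcond]), filter_ne_small t (s + 1) (s + ((0:Nat):Int)) (by simp),
        map_snd_sum]
      simp
    | jj + 1 =>
      have hcond : ((s, x).1 != s + ((jj + 1 : Nat) : Int)) = true := by simp; omega
      rw [List.filter_cons, if_pos hcond]
      have hpred : (fun p : Int × α => p.1 != s + ((jj + 1 : Nat) : Int))
          = (fun p : Int × α => p.1 != (s + 1) + (jj : Int)) := by
        funext p; congr 1; push_cast; ring
      rw [hpred]
      simp only [List.map_cons, List.sum_cons]
      rw [ih (s + 1) jj (by simpa using Nat.lt_of_succ_lt_succ hj)]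
      simp
      omega

theorem main_eq (dna : List String) (k : Int) : det_median_string dna k = det_median_string_alt dna k := by
  simp only [det_median_string, det_median_string_alt]
  refine congrArg (fun r : List Char × Int => String.ofList r.1) ?_
  apply PySem.List.foldl_congr_mem
  intro acc le hle
  apply PySem.List.foldl_congr_mem
  intro acc2 i hi
  obtain ⟨j, hjlen, hle_eq⟩ := List.getElem_of_mem hle
  rw [PySem.List.length_enumerate] at hjlen
  rw [PySem.List.getElem_enumerate] at hle_eq
  have hle1 : le.1 = (0 : Int) + (j : Int) := by rw [← hle_eq]
  have hle2 : le.2 = dna[j]'hjlen := by rw [← hle_eq]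
  -- the pattern is among the deduplicated windows
  have hmem : PySem.List.slice le.2.toList (some i) (some (i + k)) ∈
      PySem.List.dedup (dna.flatMap (fun line =>
        (PySem.List.pyRange 0 ((line.toList.length : Int) - k + 1) 1).map
          (fun i => PySem.List.slice line.toList (some i) (some (i + k))))) := by
    rw [PySem.List.mem_dedup]
    refine List.mem_flatMap.mpr ⟨le.2, ?_, List.mem_map.mpr ⟨i, hi, rfl⟩⟩
    rw [hle2]; exact List.getElem_mem hjlen
  rw [lookup_foldl_insert _ _ _ _]
  rw [if_pos hmem]
  simp only [Option.getD_some]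
  -- both branches share the score; prove the scores equal
  have hsum :
      (((PySem.List.enumerate dna 0).filter (fun p => p.1 != le.1)).map
        (fun p => hdA (PySem.List.slice le.2.toList (some i) (some (i + k))) p.2.toList)).sum
      = (dna.map (fun l => hdB (PySem.List.slice le.2.toList (some i) (some (i + k))) l.toList)).sum
        - PySem.List.pyGetD (dna.map (fun l => hdB (PySem.List.slice le.2.toList (some i) (some (i + k))) l.toList)) le.1 0 := by
    have hA : (fun p : Int × String => hdA (PySem.List.slice le.2.toList (some i) (some (i + k))) p.2.toList)
        = (fun p : Int × String => hdB (PySem.List.slice le.2.toList (some i) (some (i + k))) p.2.toList) := by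
      funext p; exact hd_eq _ _
    rw [hA, hle1]
    rw [filt_sum (fun l => hdB (PySem.List.slice le.2.toList (some i) (some (i + k))) l.toList) dna 0 j hjlen]
    have : ((0 : Int) + (j : Int)) = ((j : Nat) : Int) := by omega
    rw [this, PySem.List.pyGetD_natCast]
    rw [List.getD_eq_getElem?_getD, List.getElem?_map]
    simp [hjlen]
  rw [hsum]




-- ===== VERDICT (by name: the statement is the Claim_ definition above) =====
theorem det_median_string_spec : Claim_equal_det_median_string := by
  intro dna k _
  unfold Spec_det_median_string
  exact main_eq dna k
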